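-- pv_equiv track=rewrite | github.com/Paulo-Marcos-Assis/news-flow-system | post_flow/cross-reference-noticias/main.py | _sao_processos_duplicados
-- ===== SOURCE A (Python) =====
-- def _sao_processos_duplicados(processos_info):
--     """
--     Verifica se todos os processos candidatos são duplicatas
--     (mesmo edital, mesmo município, mesma modalidade).
--     """
--     if len(processos_info) < 2:
--         return False
--
--     primeiro = processos_info[0]
--     edital_ref = primeiro.get('numero_edital', '').strip().lower()
--     municipio_ref = primeiro.get('nome_municipio', '').strip().lower()
--     modalidade_ref = primeiro.get('modalidade', '').strip().lower()
--
--     for proc in processos_info[1:]: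
--         edital = proc.get('numero_edital', '').strip().lower()
--         municipio = proc.get('nome_municipio', '').strip().lower()
--         modalidade = proc.get('modalidade', '').strip().lower()
--
--         if edital != edital_ref or municipio != municipio_ref or modalidade != modalidade_ref:
--             return False
--
--     return True
-- ===== SOURCE B (Python) =====
-- def _sao_processos_duplicados(processos_info):
--     if len(processos_info) < 2:
--         return False
--     chaves = {
--         (p.get('numero_edital', '').strip().lower(),
--          p.get('nome_municipio', '').strip().lower(),
--          p.get('modalidade', '').strip().lower())
--         for p in processos_info
--     }
--     return len(chaves) == 1
-- ===== Notes on version B (the rewrite author's own statement) =====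
-- stated objective: simpler
-- what changed: Replaces the reference-record comparison loop with early exit by building a set of normalized (edital, municipio, modalidade) key tuples over all records and checking the set has exactly one element.
import Mathlib
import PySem

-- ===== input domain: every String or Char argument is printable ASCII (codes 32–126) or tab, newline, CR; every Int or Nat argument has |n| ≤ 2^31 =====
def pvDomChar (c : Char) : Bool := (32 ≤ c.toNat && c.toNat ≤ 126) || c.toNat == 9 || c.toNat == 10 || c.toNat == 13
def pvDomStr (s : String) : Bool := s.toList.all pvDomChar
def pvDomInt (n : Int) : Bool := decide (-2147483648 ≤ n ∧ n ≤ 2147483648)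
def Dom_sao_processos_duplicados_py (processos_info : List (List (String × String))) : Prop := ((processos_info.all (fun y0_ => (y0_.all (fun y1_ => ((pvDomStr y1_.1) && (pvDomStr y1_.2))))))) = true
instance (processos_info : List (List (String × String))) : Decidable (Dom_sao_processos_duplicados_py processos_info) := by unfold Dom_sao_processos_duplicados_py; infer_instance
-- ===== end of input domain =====

-- B replaces A's compare-each-record-to-the-first loop (with early exit) by collecting the
-- normalized key tuples of ALL records into a set and checking it has exactly one element (objective: simpler).

-- ===== PORT A =====
-- A's loop over processos_info[1:] with early 'return False' on any mismatch
def pvLoopA (eRef mRef dRef : String) : List (List (String × String)) → Bool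
  | [] => true
  | proc :: rest =>
    let edital := PySem.Str.lower (PySem.Str.strip ((PySem.Dict.mk proc).getD "numero_edital" ""))
    let municipio := PySem.Str.lower (PySem.Str.strip ((PySem.Dict.mk proc).getD "nome_municipio" ""))
    let modalidade := PySem.Str.lower (PySem.Str.strip ((PySem.Dict.mk proc).getD "modalidade" ""))
    if edital != eRef || municipio != mRef || modalidade != dRef then false
    else pvLoopA eRef mRef dRef rest

def sao_processos_duplicados_py (processos_info : List (List (String × String))) : Bool :=
  if processos_info.length < 2 then false
  else
    match processos_info with
    | [] => false  -- unreachable: length ≥ 2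
    | primeiro :: rest =>
      let edital_ref := PySem.Str.lower (PySem.Str.strip ((PySem.Dict.mk primeiro).getD "numero_edital" ""))
      let municipio_ref := PySem.Str.lower (PySem.Str.strip ((PySem.Dict.mk primeiro).getD "nome_municipio" ""))
      let modalidade_ref := PySem.Str.lower (PySem.Str.strip ((PySem.Dict.mk primeiro).getD "modalidade" ""))
      pvLoopA edital_ref municipio_ref modalidade_ref rest

-- ===== PORT B =====
-- normalized key tuple of one record (B's set-comprehension body)
def pvChave (p : List (String × String)) : String × String × String :=
  ((PySem.Str.lower (PySem.Str.strip ((PySem.Dict.mk p).getD "numero_edital" ""))),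
   (PySem.Str.lower (PySem.Str.strip ((PySem.Dict.mk p).getD "nome_municipio" ""))),
   (PySem.Str.lower (PySem.Str.strip ((PySem.Dict.mk p).getD "modalidade" ""))))

def sao_processos_duplicados_py_alt (processos_info : List (List (String × String))) : Bool :=
  if processos_info.length < 2 then false
  else
    let chaves := PySem.Set.ofList (processos_info.map pvChave)
    PySem.Set.len chaves == 1

-- ===== PRECONDITION & SPEC =====
def Spec_sao_processos_duplicados_py (processos_info : List (List (String × String))) (out : Bool) : Prop := out = sao_processos_duplicados_py_alt processos_info
instance (processos_info : List (List (String × String))) (out : Bool) : Decidable (Spec_sao_processos_duplicados_py processos_info out) := by unfold Spec_sao_processos_duplicados_py; infer_instance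

-- ===== CLAIM (what is proved, stated in full; the proofs are below) =====
def Claim_equal_sao_processos_duplicados_py : Prop := ∀ (processos_info : List (List (String × String))), Dom_sao_processos_duplicados_py processos_info → Spec_sao_processos_duplicados_py processos_info (sao_processos_duplicados_py processos_info)

-- ===== LEMMAS AND PROOFS =====

-- Set.add never shrinks the carrier
theorem pv_len_le_foldl_add {α : Type} [BEq α] (l : List α) (s : List α) :
    s.length ≤ (l.foldl PySem.Set.add s).length := by
  induction l generalizing s with
  | nil => simp
  | cons x t ih =>
    refine le_trans ?_ (ih (PySem.Set.add s x))
    simp only [PySem.Set.add]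
    split <;> simp

-- a set built from a singleton seed has one element iff every added element equals the seed
theorem pv_foldl_add_singleton_len {α : Type} [BEq α] [LawfulBEq α] (l : List α) (a : α) :
    ((l.foldl PySem.Set.add [a]).length == 1) = l.all (fun x => x == a) := by
  induction l with
  | nil => simp
  | cons x t ih =>
    by_cases hxa : x = a
    · subst hxa
      simpa [PySem.Set.add, PySem.Set.contains] using ih
    · have hadd : PySem.Set.add [a] x = [a, x] := by
        simp [PySem.Set.add, PySem.Set.contains]
        exact fun h => hxa h
      have hge : 2 ≤ (t.foldl PySem.Set.add [a, x]).length := by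
        simpa using pv_len_le_foldl_add t [a, x]
      simp only [List.foldl_cons, hadd, List.all_cons]
      have h1 : ((t.foldl PySem.Set.add [a, x]).length == 1) = false := by
        simp; omega
      have h2 : (x == a) = false := by simp [hxa]
      simp [h1, h2]

theorem pv_cond_eq (eR mR dR e m d : String) :
    (e != eR || m != mR || d != dR) = !((e, m, d) == ((eR, mR, dR) : String × String × String)) := by
  have h : ((e, m, d) == ((eR, mR, dR) : String × String × String))
      = ((e == eR) && ((m == mR) && (d == dR))) := rfl
  rw [h, bne, bne, bne, Bool.not_and, Bool.not_and, Bool.or_assoc]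

theorem pv_loopA_eq_all (eR mR dR : String) (l : List (List (String × String))) :
    pvLoopA eR mR dR l = l.all (fun p => pvChave p == (eR, mR, dR)) := by
  induction l with
  | nil => rfl
  | cons p t ih =>
    rw [List.all_cons, ← ih, pvLoopA]
    simp only [pv_cond_eq ]
    rw [show ((pvChave p == ((eR, mR, dR) : String × String × String)) : Bool) = (pvChave p == (eR, mR, dR)) from rfl]
    cases h : (pvChave p == ((eR, mR, dR) : String × String × String)) <;>
      simp_all [pvChave]

-- ===== VERDICT (by name: the statement is the Claim_ definition above) =====
theorem sao_processos_duplicados_py_spec : Claim_equal_sao_processos_duplicados_py := by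
  intro pi _
  unfold Spec_sao_processos_duplicados_py sao_processos_duplicados_py sao_processos_duplicados_py_alt
  by_cases hlen : pi.length < 2
  · simp [hlen]
  · simp only [if_neg hlen]
    match pi, hlen with
    | [], h => exact absurd (by simp) h
    | primeiro :: rest, _ =>
      show pvLoopA _ _ _ rest = _
      rw [pv_loopA_eq_all]
      show _ = (PySem.Set.len (PySem.Set.ofList ((primeiro :: rest).map pvChave)) == 1)
      rw [PySem.Set.ofList_eq_foldl, List.map_cons, List.foldl_cons]
      have hseed : PySem.Set.add ([] : List (String × String × String)) (pvChave primeiro)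
          = [pvChave primeiro] := rfl
      rw [hseed]
      simp only [PySem.Set.len]
      have hcast : ∀ n : Nat, (((n : Int)) == (1 : Int)) = (n == 1) := by
        intro n; by_cases h : n = 1 <;> simp [h]
      rw [hcast, pv_foldl_add_singleton_len]
      simp [pvChave, Function.comp_def]
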